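-- pv_equiv track=rewrite | github.com/MrDeshaies/NOT-projecteuler.net | euler_023.py | findAsSumOfTwoAbundants
-- ===== SOURCE A (Python) =====
-- import math
--
-- def findAsSumOfTwoAbundants(target,abundants):
--     # find two numbers, x and y, from the abundants array which sum up to target
--     for x in abundants:
--         if x > target:
--             return [] # didn't find anything
--         y = findMatchingY(target, x, abundants)
--         if y != None:
--             return [x,y]
--     return []
--
-- def findMatchingY(target, x, abundants):
--     # use binary search to find the correct y
--     l = 0
--     r = len(abundants)-1
--     while l <= r:
--         i = math.floor( (l+r) / 2)
--         sum = abundants[i] + x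
--         if sum < target:
--             l = i+1
--         elif sum > target:
--             r = i-1
--         if sum == target:
--             return abundants[i]
--     return None
-- ===== SOURCE B (Python) =====
-- def findAsSumOfTwoAbundants(target, abundants):
--     # find two numbers, x and y, from the abundants array which sum up to target
--     pool = set(abundants)
--     for x in abundants:
--         if x > target:
--             return []
--         if target - x in pool:
--             return [x, target - x]
--     return []
-- ===== Notes on version B (the rewrite author's own statement) =====
-- stated objective: faster
-- what changed: B builds a hash set of the abundants once and answers each complement query with an O(1) lookup, removing A's per-element binary search; Pre_ excludes only unsorted lists in which a complement pair exists by value, the inputs on which A's binary search (which presumes sorted input) returns an accidental hit-or-miss result.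
-- outside the precondition, e.g. on findAsSumOfTwoAbundants(5, [3, 2]): A returns [2, 3], B returns [3, 2]; on findAsSumOfTwoAbundants(4, [2, 3, 1]): A returns [2, 2], B returns [2, 2]
import Mathlib
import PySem

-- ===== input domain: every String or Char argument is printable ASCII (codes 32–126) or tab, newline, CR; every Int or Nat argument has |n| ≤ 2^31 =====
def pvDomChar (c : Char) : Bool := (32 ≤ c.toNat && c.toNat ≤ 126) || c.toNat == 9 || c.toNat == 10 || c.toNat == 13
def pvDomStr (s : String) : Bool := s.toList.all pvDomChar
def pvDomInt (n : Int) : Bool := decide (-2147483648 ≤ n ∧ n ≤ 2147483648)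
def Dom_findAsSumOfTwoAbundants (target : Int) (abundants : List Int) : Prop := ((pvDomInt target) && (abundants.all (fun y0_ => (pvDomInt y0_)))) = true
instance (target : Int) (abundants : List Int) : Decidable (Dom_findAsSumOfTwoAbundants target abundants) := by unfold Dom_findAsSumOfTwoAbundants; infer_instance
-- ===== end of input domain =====

-- B builds a hash set of the abundants once and answers each complement query with one lookup,
-- replacing A's per-element binary search (objective: faster).

-- ===== PORT A =====
-- findMatchingY's while loop: l, r evolve; returns abundants[i] when abundants[i] + x == target.
def findMatchingY (target x : Int) (abundants : List Int) (l r : Int) : Option Int :=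
  if hlr : l ≤ r then
    let i := PySem.Int.floordiv (l + r) 2
    match PySem.List.pyGet? abundants i with
    | none => none  -- IndexError: unreachable for the arguments A passes (0 ≤ l, r < len)
    | some ai =>
      let sum := ai + x
      if sum < target then findMatchingY target x abundants (i + 1) r
      else if sum > target then findMatchingY target x abundants l (i - 1)
      else some ai
  else none
termination_by (r + 1 - l).toNat
decreasing_by
  · have h := PySem.Int.floordiv_two_mid_bounds hlr; omega
  · have h := PySem.Int.floordiv_two_mid_bounds hlr; omega

def findLoopA (target : Int) (abundants : List Int) : List Int → List Int
  | [] => []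
  | x :: rest =>
    if x > target then []
    else
      match findMatchingY target x abundants 0 (abundants.length - 1) with
      | some y => [x, y]
      | none => findLoopA target abundants rest

def findAsSumOfTwoAbundants (target : Int) (abundants : List Int) : List Int :=
  findLoopA target abundants abundants

-- ===== PORT B =====
def altLoopB (target : Int) (pool : PySem.Set Int) : List Int → List Int
  | [] => []
  | x :: rest =>
    if x > target then []
    else if PySem.Set.contains pool (target - x) then [x, target - x]
    else altLoopB target pool rest

def findAsSumOfTwoAbundants_alt (target : Int) (abundants : List Int) : List Int :=
  let pool := PySem.Set.ofList abundants
  altLoopB target pool abundants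

-- ===== PRECONDITION & SPEC =====
-- Pre_ excludes only unsorted abundants lists in which some complement pair exists by value:
-- A's binary search presumes nondecreasingly sorted input, and on such unsorted lists its
-- hit-or-miss result is an accident of midpoint reachability (when no pair exists at all,
-- both trivially return [], so those lists stay inside Pre_).
def Pre_findAsSumOfTwoAbundants (target : Int) (abundants : List Int) : Prop :=
  abundants.Pairwise (· ≤ ·) ∨ ∀ x ∈ abundants, x ≤ target → (target - x) ∉ abundants
instance (target : Int) (abundants : List Int) : Decidable (Pre_findAsSumOfTwoAbundants target abundants) := by unfold Pre_findAsSumOfTwoAbundants; infer_instance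

def pvWitness_findAsSumOfTwoAbundants : Int × List Int := (24, [12, 12, 18])

def Spec_findAsSumOfTwoAbundants (target : Int) (abundants : List Int) (out : List Int) : Prop := out = findAsSumOfTwoAbundants_alt target abundants
instance (target : Int) (abundants : List Int) (out : List Int) : Decidable (Spec_findAsSumOfTwoAbundants target abundants out) := by unfold Spec_findAsSumOfTwoAbundants; infer_instance

-- ===== CLAIM (what is proved, stated in full; the proofs are below) =====
def Claim_equal_findAsSumOfTwoAbundants : Prop := ∀ (target : Int) (abundants : List Int), Dom_findAsSumOfTwoAbundants target abundants → Pre_findAsSumOfTwoAbundants target abundants → Spec_findAsSumOfTwoAbundants target abundants (findAsSumOfTwoAbundants target abundants)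

-- ===== LEMMAS AND PROOFS =====

-- A's binary search only ever returns the exact complement target - x, and an element of the list.
theorem findMatchingY_eq_some_aux (target x : Int) (abundants : List Int) :
    ∀ (n : Nat) (l r : Int), (r + 1 - l).toNat < n →
      ∀ y, findMatchingY target x abundants l r = some y →
        y = target - x ∧ y ∈ abundants := by
  intro n
  induction n with
  | zero => intro l r hn; omega
  | succ n ih =>
      intro l r hn y hy
      rw [findMatchingY] at hy
      by_cases hlr : l ≤ r
      · have hmid := PySem.Int.floordiv_two_mid_bounds hlr
        simp only [dif_pos hlr] at hy
        cases hg : PySem.List.pyGet? abundants (PySem.Int.floordiv (l + r) 2) with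
        | none => simp only [hg] at hy; simp at hy
        | some ai =>
            simp only [hg] at hy
            by_cases h1 : ai + x < target
            · rw [if_pos h1] at hy
              exact ih ((PySem.Int.floordiv (l + r) 2) + 1) r (by omega) y hy
            · rw [if_neg h1] at hy
              by_cases h2 : ai + x > target
              · rw [if_pos h2] at hy
                exact ih l ((PySem.Int.floordiv (l + r) 2) - 1) (by omega) y hy
              · rw [if_neg h2] at hy
                simp only [Option.some.injEq] at hy
                subst hy
                exact ⟨by omega, PySem.List.mem_of_pyGet?_eq_some abundants hg⟩
      · simp only [dif_neg hlr] at hy; simp at hy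

theorem findMatchingY_eq_some (target x : Int) (abundants : List Int) (l r y : Int)
    (hy : findMatchingY target x abundants l r = some y) : y = target - x ∧ y ∈ abundants :=
  findMatchingY_eq_some_aux target x abundants ((r + 1 - l).toNat + 1) l r (by omega) y hy

-- On a sorted list, the binary search succeeds whenever target - x occurs within [l, r].
theorem findMatchingY_finds_aux (target x : Int) (abundants : List Int)
    (hs : abundants.Pairwise (· ≤ ·)) :
    ∀ (n : Nat) (l r : Int), (r + 1 - l).toNat < n →
      0 ≤ l → r < abundants.length →
      ∀ (k : Nat) (hk : k < abundants.length),
        l ≤ (k : Int) → (k : Int) ≤ r → abundants[k] = target - x →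
        (findMatchingY target x abundants l r).isSome := by
  have hle : ∀ (i j : Nat) (hi : i < abundants.length) (hj : j < abundants.length),
      i ≤ j → abundants[i] ≤ abundants[j] := by
    intro i j hi hj hij
    rcases Nat.lt_or_ge i j with h | h
    · exact (List.pairwise_iff_getElem.mp hs) i j hi hj h
    · have : i = j := by omega
      subst this; exact le_refl _
  intro n
  induction n with
  | zero => intro l r hn; omega
  | succ n ih =>
      intro l r hn hl0 hrlen k hk hlk hkr hak
      have hlr : l ≤ r := by omega
      rw [findMatchingY]
      simp only [dif_pos hlr]
      have hmid := PySem.Int.floordiv_two_mid_bounds hlr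
      set i := PySem.Int.floordiv (l + r) 2 with hi
      have hi0 : 0 ≤ i := by omega
      have hilen : i < abundants.length := by omega
      have hitn : i.toNat < abundants.length := by omega
      have hg : PySem.List.pyGet? abundants i = some abundants[i.toNat] := by
        rw [PySem.List.pyGet?_of_nonneg abundants hi0]
        exact List.getElem?_eq_getElem hitn
      rw [hg]
      dsimp only
      set ai := abundants[i.toNat] with hai
      by_cases h1 : ai + x < target
      · rw [if_pos h1]
        -- ai < target - x = abundants[k], so i.toNat < k
        have hik : i.toNat < k := by
          by_contra hc
          have := hle k i.toNat hk hitn (by omega)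
          omega
        exact ih (i + 1) r (by omega) (by omega) hrlen k hk (by omega) hkr hak
      · rw [if_neg h1]
        by_cases h2 : ai + x > target
        · rw [if_pos h2]
          have hki : k < i.toNat := by
            by_contra hc
            have := hle i.toNat k hitn hk (by omega)
            omega
          exact ih l (i - 1) (by omega) hl0 (by omega) k hk hlk (by omega) hak
        · rw [if_neg h2]
          simp

theorem findMatchingY_iff_mem (target x : Int) (abundants : List Int)
    (hs : abundants.Pairwise (· ≤ ·)) :
    (findMatchingY target x abundants 0 (abundants.length - 1)).isSome ↔
      (target - x) ∈ abundants := by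
  constructor
  · intro h
    cases hm : findMatchingY target x abundants 0 (abundants.length - 1) with
    | none => rw [hm] at h; simp at h
    | some y =>
        obtain ⟨hy, hmem⟩ := findMatchingY_eq_some target x abundants _ _ y hm
        rwa [hy] at hmem
  · intro hmem
    obtain ⟨k, hk, hak⟩ := List.getElem_of_mem hmem
    have hlen : 0 < abundants.length := by omega
    exact findMatchingY_finds_aux target x abundants hs
      ((abundants.length : Int) - 1 + 1 - 0).toNat.succ 0 ((abundants.length : Int) - 1)
      (by omega) (by omega) (by omega) k hk (by omega) (by omega) hak

theorem loops_eq (target : Int) (abundants : List Int)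
    (hs : abundants.Pairwise (· ≤ ·)) :
    ∀ xs, findLoopA target abundants xs =
      altLoopB target (PySem.Set.ofList abundants) xs := by
  intro xs
  induction xs with
  | nil => rfl
  | cons x rest ih =>
      rw [findLoopA, altLoopB]
      by_cases hx : x > target
      · rw [if_pos hx, if_pos hx]
      · rw [if_neg hx, if_neg hx]
        have hiff := findMatchingY_iff_mem target x abundants hs
        cases hm : findMatchingY target x abundants 0 (abundants.length - 1) with
        | some y =>
            obtain ⟨hy, _⟩ := findMatchingY_eq_some target x abundants _ _ y hm
            have hmem : (target - x) ∈ PySem.Set.ofList abundants := by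
              exact (PySem.Set.mem_ofList abundants _).mpr <| id <| hiff.mp (by rw [hm]; simp)
            rw [if_pos ((PySem.Set.contains_iff _ _).mpr hmem)]
            rw [hy]
        | none =>
            have hnmem : (target - x) ∉ abundants := by
              intro hmem
              have := hiff.mpr hmem
              rw [hm] at this; simp at this
            have hnc : ¬ (PySem.Set.contains (PySem.Set.ofList abundants) (target - x) = true) := by
              intro hc
              exact hnmem ((PySem.Set.mem_ofList abundants _).mp ((PySem.Set.contains_iff _ _).mp hc))
            rw [if_neg hnc]
            exact ih

-- When no complement pair exists by value, both loops fall through identically.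
theorem loops_eq_nopair (target : Int) (abundants : List Int)
    (hnp : ∀ x ∈ abundants, x ≤ target → (target - x) ∉ abundants) :
    ∀ xs, (∀ x ∈ xs, x ∈ abundants) →
      findLoopA target abundants xs = altLoopB target (PySem.Set.ofList abundants) xs := by
  intro xs
  induction xs with
  | nil => intro _; rfl
  | cons x rest ih =>
      intro hsub
      rw [findLoopA, altLoopB]
      by_cases hx : x > target
      · rw [if_pos hx, if_pos hx]
      · rw [if_neg hx, if_neg hx]
        have hnmem : (target - x) ∉ abundants :=
          hnp x (hsub x (List.mem_cons_self)) (by omega)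
        have hnc : ¬ (PySem.Set.contains (PySem.Set.ofList abundants) (target - x) = true) := by
          intro hc
          exact hnmem ((PySem.Set.mem_ofList abundants _).mp ((PySem.Set.contains_iff _ _).mp hc))
        rw [if_neg hnc]
        cases hm : findMatchingY target x abundants 0 (abundants.length - 1) with
        | some y =>
            obtain ⟨hy, hmem⟩ := findMatchingY_eq_some target x abundants _ _ y hm
            exact absurd (hy ▸ hmem) hnmem
        | none =>
            exact ih (fun z hz => hsub z (List.mem_cons_of_mem x hz))

-- ===== VERDICT (by name: the statement is the Claim_ definition above) =====
theorem findAsSumOfTwoAbundants_spec : Claim_equal_findAsSumOfTwoAbundants := by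
  intro target abundants _ hpre
  unfold Spec_findAsSumOfTwoAbundants findAsSumOfTwoAbundants findAsSumOfTwoAbundants_alt
  rcases hpre with hs | hnp
  · exact loops_eq target abundants hs abundants
  · exact loops_eq_nopair target abundants hnp abundants (fun _ h => h)
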